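-- pv_equiv track=rewrite | github.com/LarryHH/NNWeightInformedPQC | utils/ansatze/TTN.py | _generate_tree_tuples
-- ===== SOURCE A (Python) =====
-- def _generate_tree_tuples(n: int):
--     """
--     Generate tuples representing TTN tree connectivity for n qubits.
--
--     Args:
--         n (int): Must be power of 2 and >0.
--     Returns:
--         List of lists of tuples, each tuple is a pair of qubit indices.
--     """
--     levels = []
--     # initial pairing
--     pairs = [(i, i+1) for i in range(0, n, 2)]
--     levels.append(pairs)
--
--     while len(pairs) > 1:
--         new_pairs = []
--         for a, b in zip(pairs[0::2], pairs[1::2]):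
--             new_pairs.append((a[1], b[1]))
--         levels.append(new_pairs)
--         pairs = new_pairs
--
--     return levels
-- ===== SOURCE B (Python) =====
-- def _level(l, count):
--     # closed-form pairs of level l: right endpoints of merged blocks of width 2**(l+1)
--     return [(2**(l+1)*j + 2**l - 1, 2**(l+1)*j + 2**(l+1) - 1) for j in range(count)]
--
--
-- def _generate_tree_tuples(n: int):
--     count = len(range(0, n, 2))
--     levels = [_level(0, count)]
--     l = 0
--     while count > 1:
--         count //= 2
--         l += 1
--         levels.append(_level(l, count))
--     return levels
-- ===== Notes on version B (the rewrite author's own statement) =====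
-- stated objective: alternative
-- what changed: Each level's pairs are produced directly from a closed-form index formula (2^(l+1)*j + 2^l - 1, 2^(l+1)*j + 2^(l+1) - 1) driven only by a halving counter, instead of slicing/zipping the previous level's pair list.
import Mathlib
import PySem

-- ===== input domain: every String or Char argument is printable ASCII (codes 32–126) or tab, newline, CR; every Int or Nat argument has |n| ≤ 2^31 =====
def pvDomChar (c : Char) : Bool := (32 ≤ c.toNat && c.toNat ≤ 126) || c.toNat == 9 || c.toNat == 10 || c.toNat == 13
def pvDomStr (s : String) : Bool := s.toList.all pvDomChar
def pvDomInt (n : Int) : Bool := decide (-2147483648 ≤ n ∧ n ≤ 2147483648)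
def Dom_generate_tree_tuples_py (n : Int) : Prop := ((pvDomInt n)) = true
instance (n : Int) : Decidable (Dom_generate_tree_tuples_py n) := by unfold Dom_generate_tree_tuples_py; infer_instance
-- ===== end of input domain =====

-- B replaces A's slice/zip propagation of the previous level by a closed-form per-level
-- index formula driven by a halving counter (objective: alternative; return values identical).

-- ===== PORT A =====
-- new_pairs of one iteration of A's while loop: zip(pairs[0::2], pairs[1::2]), appending (a[1], b[1])
def pyA_newPairs (pairs : List (Int × Int)) : List (Int × Int) :=
  (((PySem.List.slice? pairs (some 0) none 2).getD []).zip
   ((PySem.List.slice? pairs (some 1) none 2).getD [])).foldl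
    (fun acc ab => acc ++ [(ab.1.2, ab.2.2)]) []

-- termination fact for the while loop (cited by decreasing_by below)
theorem pyA_newPairs_len_le (xs : List (Int × Int)) :
    (pyA_newPairs xs).length ≤ xs.length / 2 := by
  unfold pyA_newPairs
  rw [PySem.List.foldl_append_singleton_eq_map]
  simp only [List.nil_append, List.length_map, List.length_zip]
  have h2 : ((PySem.List.slice? xs (some 1) none 2).getD []).length ≤ xs.length / 2 := by
    simp only [PySem.List.slice?, PySem.List.sliceIndices]
    norm_num
    refine le_trans (le_trans (List.length_filterMap_le _ _) (le_of_eq (List.length_range))) ?_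
    split_ifs <;> omega
  omega

-- A's while loop: emits every level after the initial pairing
def pyA_loop (pairs : List (Int × Int)) : List (List (Int × Int)) :=
  if _h : pairs.length > 1 then
    pyA_newPairs pairs :: pyA_loop (pyA_newPairs pairs)
  else []
termination_by pairs.length
decreasing_by
  have := pyA_newPairs_len_le pairs
  omega

def generate_tree_tuples_py (n : Int) : List (List (Int × Int)) :=
  let pairs := (PySem.List.pyRange 0 n 2).map (fun i => (i, i + 1))
  pairs :: pyA_loop pairs

-- ===== PORT B =====
-- _level(l, count); l is a nonnegative loop counter in Source B, so a Nat exponent is exact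
def pyB_level (l : Nat) (count : Int) : List (Int × Int) :=
  (PySem.List.pyRange 0 count 1).map
    (fun j => ((2 : Int)^(l+1) * j + 2^l - 1, (2 : Int)^(l+1) * j + 2^(l+1) - 1))

def pyB_loop (count : Int) (l : Nat) : List (List (Int × Int)) :=
  if h : 1 < count then
    pyB_level (l+1) (PySem.Int.floordiv count 2) :: pyB_loop (PySem.Int.floordiv count 2) (l+1)
  else []
termination_by count.toNat
decreasing_by
  rw [PySem.Int.floordiv_eq_ediv_of_pos (by norm_num)]
  omega

def generate_tree_tuples_py_alt (n : Int) : List (List (Int × Int)) :=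
  let count : Int := (PySem.List.pyRange 0 n 2).length
  pyB_level 0 count :: pyB_loop count 0

-- ===== PRECONDITION & SPEC =====
def Spec_generate_tree_tuples_py (n : Int) (out : List (List (Int × Int))) : Prop := out = generate_tree_tuples_py_alt n
instance (n : Int) (out : List (List (Int × Int))) : Decidable (Spec_generate_tree_tuples_py n out) := by unfold Spec_generate_tree_tuples_py; infer_instance

-- ===== CLAIM (what is proved, stated in full; the proofs are below) =====
def Claim_equal_generate_tree_tuples_py : Prop := ∀ (n : Int), Dom_generate_tree_tuples_py n → Spec_generate_tree_tuples_py n (generate_tree_tuples_py n)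

-- ===== LEMMAS AND PROOFS =====

-- the closed-form pair at level l, position k (Nat-indexed)
def pvF (l k : Nat) : Int × Int :=
  ((2 : Int)^(l+1) * k + 2^l - 1, (2 : Int)^(l+1) * k + 2^(l+1) - 1)

theorem pvSliceEven {α : Type} (f : Nat → α) (c : Nat) :
    PySem.List.slice? ((List.range c).map f) (some 0) none 2
      = some ((List.range ((c+1)/2)).map (fun k => f (2*k))) := by
  simp only [PySem.List.slice?, PySem.List.sliceIndices]
  norm_num
  have hcount : (if 0 < c then (((c:Int) + 2 - 1) / 2).toNat else 0) = (c+1)/2 := by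
    split_ifs <;> omega
  rw [hcount]
  have hcg : ∀ x ∈ List.range ((c+1)/2),
      Option.map f (List.range c)[(2 * (x:Int)).toNat]? = (some ∘ (fun k => f (2*k))) x := by
    intro x hx
    rw [List.mem_range] at hx
    have h1 : ((2 * (x:Int)).toNat) = 2*x := by omega
    rw [h1, List.getElem?_range (by omega)]
    rfl
  rw [List.filterMap_congr hcg, List.filterMap_eq_map]

theorem pvSliceOdd {α : Type} (f : Nat → α) (c : Nat) :
    PySem.List.slice? ((List.range c).map f) (some 1) none 2
      = some ((List.range (c/2)).map (fun k => f (2*k+1))) := by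
  simp only [PySem.List.slice?, PySem.List.sliceIndices]
  norm_num
  by_cases hc : 1 < c
  · have hmin : (min 1 (c:Int)) = 1 := by omega
    rw [hmin, if_pos hc]
    have hcount : (((c:Int) - 1 + 2 - 1) / 2).toNat = c/2 := by omega
    rw [hcount]
    have hcg : ∀ x ∈ List.range (c/2),
        Option.map f (List.range c)[(1 + 2 * (x:Int)).toNat]? = (some ∘ (fun k => f (2*k+1))) x := by
      intro x hx
      rw [List.mem_range] at hx
      have h1 : ((1 + 2 * (x:Int)).toNat) = 2*x+1 := by omega
      rw [h1, List.getElem?_range (by omega)]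
      rfl
    rw [List.filterMap_congr hcg, List.filterMap_eq_map]
  · rw [if_neg hc]
    have h0 : c/2 = 0 := by omega
    simp [h0]

theorem pvZipMapRange {α β : Type} (g : Nat → α) (h : Nat → β) (a b : Nat) (hba : b ≤ a) :
    ((List.range a).map g).zip ((List.range b).map h)
      = (List.range b).map (fun k => (g k, h k)) := by
  have hsplit : (List.range a).map g
      = ((List.range b).map g) ++ ((List.range (a-b)).map (fun k => g (b + k))) := by
    conv_lhs => rw [show a = b + (a - b) from by omega, List.range_add]
    rw [List.map_append, List.map_map]
    rfl
  rw [hsplit, ← List.append_nil ((List.range b).map h), List.zip_append (by simp)]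
  simp [List.zip_map']

theorem pvNewPairs_eq (l c : Nat) :
    pyA_newPairs ((List.range c).map (pvF l)) = (List.range (c/2)).map (pvF (l+1)) := by
  unfold pyA_newPairs
  rw [pvSliceEven, pvSliceOdd]
  simp only [Option.getD_some]
  rw [pvZipMapRange _ _ _ _ (by omega)]
  rw [PySem.List.foldl_append_singleton_eq_map]
  simp only [List.nil_append, List.map_map]
  refine List.map_congr_left ?_
  intro k _
  simp only [Function.comp, pvF, Prod.mk.injEq]
  constructor <;> · push_cast; ring

theorem pvLevel_eq (l c : Nat) : pyB_level l (c : Int) = (List.range c).map (pvF l) := by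
  unfold pyB_level
  rw [PySem.List.pyRange_zero_natCast, List.map_map]
  rfl

theorem pvLoop_eq (c : Nat) : ∀ l : Nat, pyA_loop ((List.range c).map (pvF l)) = pyB_loop (c : Int) l := by
  induction c using Nat.strong_induction_on with
  | _ c IH =>
    intro l
    by_cases hc : 1 < c
    · have hfd : PySem.Int.floordiv (c : Int) 2 = ((c/2 : Nat) : Int) := by
        exact_mod_cast PySem.Int.floordiv_natCast c 2
      have hB : pyB_loop (c : Int) l
          = pyB_level (l+1) (PySem.Int.floordiv (c : Int) 2)
            :: pyB_loop (PySem.Int.floordiv (c : Int) 2) (l+1) := by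
        rw [pyB_loop, dif_pos (by exact_mod_cast hc)]
      rw [pyA_loop, dif_pos (by simpa using hc)]
      rw [pvNewPairs_eq, IH (c/2) (by omega) (l+1), hB, hfd, pvLevel_eq]
    · rw [pyA_loop, dif_neg (by simpa using hc)]
      rw [pyB_loop, dif_neg (by exact_mod_cast hc)]

theorem pvPairsA_eq (n : Int) :
    (PySem.List.pyRange 0 n 2).map (fun i => (i, i + 1))
      = (List.range (PySem.List.pyRange 0 n 2).length).map (pvF 0) := by
  rw [PySem.List.pyRange_of_pos 0 n (by norm_num)]
  simp only [List.map_map, List.length_map, List.length_range]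
  refine List.map_congr_left ?_
  intro k _
  simp only [Function.comp, pvF, Prod.mk.injEq]
  constructor <;> · push_cast; ring

-- ===== VERDICT (by name: the statement is the Claim_ definition above) =====
theorem generate_tree_tuples_py_spec : Claim_equal_generate_tree_tuples_py := by
  intro n _
  unfold Spec_generate_tree_tuples_py generate_tree_tuples_py generate_tree_tuples_py_alt
  simp only []
  rw [pvPairsA_eq, pvLoop_eq, pvLevel_eq]
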